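-- pv_equiv track=rewrite | github.com/seungboAn/py_algo | programmers/lv0/특정 문자열로 끝나는 가장 긴 부분 문자열 찾기.py | solution
-- ===== SOURCE A (Python) =====
-- def solution(myString, pat):
--     pointer = 0
--     len_pat = len(pat)
--     answer = []
--     flag = False
--
--     for i, char in enumerate(myString):
--         if char != pat[0]:
--             if flag == False:
--                 answer.append(char)
--             pointer += 1
--         else:
--             if myString[i:i + len_pat] != pat:
--                 answer.append(myString[i:i + len_pat])
--             else:
--                 answer.append(pat)
--                 flag = True
--             pointer += len_pat
--     return "".join(answer)
-- ===== SOURCE B (Python) =====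
-- def solution(myString, pat):
--     # Pass 1: find the position f of the FIRST full occurrence of pat
--     # (len(myString) if there is none).
--     f = len(myString)
--     for i, ch in enumerate(myString):
--         if ch == pat[0] and myString[i:i + len(pat)] == pat:
--             f = i
--             break
--     # Pass 2: stateless emission per position.
--     parts = []
--     for i, ch in enumerate(myString):
--         if ch == pat[0]:
--             parts.append(myString[i:i + len(pat)])
--         elif i < f:
--             parts.append(ch)
--     return "".join(parts)
-- ===== Notes on version B (the rewrite author's own statement) =====
-- stated objective: alternative
-- what changed: Replaces A's single stateful pass (a mutable flag flipped at the first full match that suppresses later single-character appends) with two stateless passes: one scan to locate the first full-match position f, then a per-position emission that appends the slice at pat[0]-positions and the character only at positions before f.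
import Mathlib
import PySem

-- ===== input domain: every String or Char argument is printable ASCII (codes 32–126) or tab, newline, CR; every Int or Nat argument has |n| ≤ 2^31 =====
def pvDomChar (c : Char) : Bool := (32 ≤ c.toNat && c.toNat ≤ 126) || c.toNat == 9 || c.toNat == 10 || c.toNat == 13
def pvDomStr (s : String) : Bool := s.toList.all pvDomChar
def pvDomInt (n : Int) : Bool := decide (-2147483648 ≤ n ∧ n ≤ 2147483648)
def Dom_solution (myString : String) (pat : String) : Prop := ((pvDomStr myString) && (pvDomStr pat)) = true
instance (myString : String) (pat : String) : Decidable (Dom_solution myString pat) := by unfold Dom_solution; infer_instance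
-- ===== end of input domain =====

-- B replaces A's stateful flag-carrying single pass by two stateless passes (pre-scan for the
-- first full-match position, then per-position emission); alternative decomposition, same cost.
-- Pre_ excludes only the inputs where Python raises IndexError (pat = "" with myString nonempty).


-- ===== PORT A =====
-- myString[i:i+len(pat)], the slice both programs take at position i
def pvSl (P L : List Char) (i : Int) : List Char :=
  PySem.List.slice L (some i) (some (i + (P.length : Int)))

-- A's loop body: branches in A's order; pat[0] is PySem.List.pyGet? P 0 (none exactly where
-- Python raises IndexError; those inputs are outside Pre_). State = (pointer, answer, flag).
def solutionStep (P L : List Char) (st : Int × List (List Char) × Bool) (ic : Int × Char) :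
    Int × List (List Char) × Bool :=
  if some ic.2 ≠ PySem.List.pyGet? P 0 then
    (st.1 + 1, (if st.2.2 = false then st.2.1 ++ [[ic.2]] else st.2.1), st.2.2)
  else if pvSl P L ic.1 ≠ P then
    (st.1 + (P.length : Int), st.2.1 ++ [pvSl P L ic.1], st.2.2)
  else
    (st.1 + (P.length : Int), st.2.1 ++ [P], true)

def solution (myString : String) (pat : String) : String :=
  let L := myString.toList
  let P := pat.toList
  let st := (PySem.List.enumerate L).foldl (solutionStep P L) (0, [], false)
  String.ofList (PySem.Chars.join [] st.2.1)

-- ===== PORT B =====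
-- First loop of Source B (with break): recursion over enumerate(myString) returning the first
-- full-match index, defaulting to len(myString).
def solutionAltFind (P L : List Char) : List (Int × Char) → Int → Int
  | [], d => d
  | (i, c) :: rest, d =>
      if some c = PySem.List.pyGet? P 0 ∧ pvSl P L i = P then i
      else solutionAltFind P L rest d

-- Second loop of Source B: stateless per-position emission
def solutionAltStep (P L : List Char) (f : Int) (parts : List (List Char)) (ic : Int × Char) :
    List (List Char) :=
  if some ic.2 = PySem.List.pyGet? P 0 then parts ++ [pvSl P L ic.1]
  else if ic.1 < f then parts ++ [[ic.2]]
  else parts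

def solution_alt (myString : String) (pat : String) : String :=
  let L := myString.toList
  let P := pat.toList
  let f := solutionAltFind P L (PySem.List.enumerate L) (L.length : Int)
  let parts := (PySem.List.enumerate L).foldl (solutionAltStep P L f) []
  String.ofList (PySem.Chars.join [] parts)

-- ===== PRECONDITION & SPEC =====
-- Pre_ excludes exactly the inputs where Python A raises IndexError reading pat[0]:
-- pat empty while myString is nonempty.
def Pre_solution (myString : String) (pat : String) : Prop := pat ≠ "" ∨ myString = ""
instance (myString : String) (pat : String) : Decidable (Pre_solution myString pat) := by
  unfold Pre_solution; infer_instance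
def pvWitness_solution : String × String := ("hello world", "l")

def Spec_solution (myString : String) (pat : String) (out : String) : Prop := out = solution_alt myString pat
instance (myString : String) (pat : String) (out : String) : Decidable (Spec_solution myString pat out) := by unfold Spec_solution; infer_instance

-- ===== CLAIM (what is proved, stated in full; the proofs are below) =====
def Claim_equal_solution : Prop := ∀ (myString : String) (pat : String), Dom_solution myString pat → Pre_solution myString pat → Spec_solution myString pat (solution myString pat)

-- ===== LEMMAS AND PROOFS =====

-- A's loop, answer component only, as a structural recursion on the enumerated suffix
def pvGoA (P L : List Char) : List (Int × Char) → Bool → List (List Char)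
  | [], _ => []
  | (i, c) :: rest, flag =>
      if some c ≠ PySem.List.pyGet? P 0 then
        (if flag = false then [[c]] else []) ++ pvGoA P L rest flag
      else if pvSl P L i ≠ P then pvSl P L i :: pvGoA P L rest flag
      else P :: pvGoA P L rest true

-- B's per-position emission, flatMap form
def pvEmit (P L : List Char) (f : Int) (ic : Int × Char) : List (List Char) :=
  if some ic.2 = PySem.List.pyGet? P 0 then [pvSl P L ic.1]
  else if ic.1 < f then [[ic.2]] else []

theorem pvFoldA (P L : List Char) (xs : List (Int × Char)) :
    ∀ (ptr : Int) (ans : List (List Char)) (flag : Bool),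
    ((xs.foldl (solutionStep P L) (ptr, ans, flag)).2.1) = ans ++ pvGoA P L xs flag := by
  induction xs with
  | nil => intro ptr ans flag; simp [pvGoA]
  | cons hd tl ih =>
    intro ptr ans flag
    obtain ⟨i, c⟩ := hd
    by_cases h1 : some c = PySem.List.pyGet? P 0
    · by_cases h3 : pvSl P L i = P
      · simp [solutionStep, pvGoA, h1, h3, ih]
      · simp [solutionStep, pvGoA, h1, h3, ih]
    · by_cases h2 : flag = false <;>
        simp [solutionStep, pvGoA, h1, h2, ih]

theorem pvFoldB (P L : List Char) (f : Int) (xs : List (Int × Char)) :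
    ∀ (parts : List (List Char)),
    (xs.foldl (solutionAltStep P L f) parts) = parts ++ xs.flatMap (pvEmit P L f) := by
  induction xs with
  | nil => intro parts; simp
  | cons hd tl ih =>
    intro parts
    obtain ⟨i, c⟩ := hd
    by_cases h1 : some c = PySem.List.pyGet? P 0
    · simp [solutionAltStep, pvEmit, h1, ih]
    · by_cases h2 : i < f <;> simp [solutionAltStep, pvEmit, h1, h2, ih]

theorem pvGoA_true (P L : List Char) (xs : List (Int × Char)) :
    pvGoA P L xs true =
      xs.flatMap (fun ic => if some ic.2 = PySem.List.pyGet? P 0 then [pvSl P L ic.1] else []) := by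
  induction xs with
  | nil => simp [pvGoA]
  | cons hd tl ih =>
    obtain ⟨i, c⟩ := hd
    by_cases h1 : some c = PySem.List.pyGet? P 0
    · by_cases h3 : pvSl P L i = P
      · simp [pvGoA, h1, h3, ih]
      · simp [pvGoA, h1, h3, ih]
    · simp [pvGoA, h1, ih]

theorem pvFind_gt (P L : List Char) (xs : List (Int × Char)) (d i : Int)
    (hd : i < d) (hall : ∀ p ∈ xs, i < p.1) :
    i < solutionAltFind P L xs d := by
  induction xs with
  | nil => simpa [solutionAltFind]
  | cons hd' tl ih =>
    obtain ⟨j, c⟩ := hd'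
    by_cases h : some c = PySem.List.pyGet? P 0 ∧ pvSl P L j = P
    · have : i < j := hall (j, c) (by simp)
      simpa [solutionAltFind, h]
    · rw [show solutionAltFind P L ((j, c) :: tl) d = solutionAltFind P L tl d from by
        simp [solutionAltFind, h]]
      exact ih (fun p hp => hall p (by simp [hp]))

theorem pvGoA_false (P L : List Char) (xs : List (Int × Char)) (d : Int)
    (hbound : ∀ p ∈ xs, p.1 < d)
    (hsort : List.Pairwise (fun a b => a.1 < b.1) xs) :
    pvGoA P L xs false = xs.flatMap (pvEmit P L (solutionAltFind P L xs d)) := by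
  induction xs with
  | nil => simp [pvGoA]
  | cons hd tl ih =>
    obtain ⟨i, c⟩ := hd
    have hi : i < d := hbound (i, c) (by simp)
    have htl : ∀ p ∈ tl, i < p.1 := (List.pairwise_cons.mp hsort).1
    by_cases h1 : some c = PySem.List.pyGet? P 0
    · by_cases h3 : pvSl P L i = P
      · -- full match: find returns i; the tail is flag-true territory
        have hfind : solutionAltFind P L ((i, c) :: tl) d = i := by
          simp [solutionAltFind, h1, h3]
        have hgo : pvGoA P L ((i, c) :: tl) false = P :: pvGoA P L tl true := by
          simp [pvGoA, h1, h3]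
        have hemit : pvEmit P L i (i, c) = [pvSl P L i] := by simp [pvEmit, h1]
        have hcongr :
            tl.flatMap (pvEmit P L i) =
            tl.flatMap (fun ic => if some ic.2 = PySem.List.pyGet? P 0 then [pvSl P L ic.1] else []) := by
          apply List.flatMap_congr
          intro p hp
          have hnp : ¬ p.1 < i := by have := htl p hp; omega
          simp [pvEmit, hnp]
        rw [hfind, hgo, pvGoA_true]
        simp only [List.flatMap_cons, hemit, hcongr]
        simp [h3]
      · have hfind : solutionAltFind P L ((i, c) :: tl) d = solutionAltFind P L tl d := by
          simp [solutionAltFind, h1, h3]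
        have hgo : pvGoA P L ((i, c) :: tl) false = pvSl P L i :: pvGoA P L tl false := by
          simp [pvGoA, h1, h3]
        rw [hfind, hgo, ih (fun p hp => hbound p (by simp [hp])) (List.pairwise_cons.mp hsort).2]
        simp [pvEmit, h1]
    · have hfind : solutionAltFind P L ((i, c) :: tl) d = solutionAltFind P L tl d := by
        simp [solutionAltFind, h1]
      have hgo : pvGoA P L ((i, c) :: tl) false = [c] :: pvGoA P L tl false := by
        simp [pvGoA, h1]
      rw [hfind, hgo, ih (fun p hp => hbound p (by simp [hp])) (List.pairwise_cons.mp hsort).2]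
      have hlt : i < solutionAltFind P L tl d := pvFind_gt P L tl d i hi htl
      simp [pvEmit, h1, hlt]

theorem pvEnumCons {α : Type} (x : α) (xs : List α) (k : Int) :
    PySem.List.enumerate (x :: xs) k = (k, x) :: PySem.List.enumerate xs (k + 1) := by
  simp [PySem.List.enumerate]

-- enumerate indices: bounded and strictly increasing
theorem pvEnumBound {α : Type} (L : List α) : ∀ (k : Int),
    ∀ p ∈ PySem.List.enumerate L k, k ≤ p.1 ∧ p.1 < k + (L.length : Int) := by
  induction L with
  | nil => intro k p hp; simp [PySem.List.enumerate] at hp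
  | cons x xs ih =>
    intro k p hp
    rw [pvEnumCons] at hp
    rcases List.mem_cons.mp hp with hp | hp
    · subst hp
      refine ⟨le_refl _, ?_⟩
      simp only [List.length_cons]
      push_cast
      omega
    · have := ih (k + 1) p hp
      simp only [List.length_cons]
      push_cast at this ⊢
      omega

theorem pvEnumSorted {α : Type} (L : List α) : ∀ (k : Int),
    List.Pairwise (fun (a b : Int × α) => a.1 < b.1) (PySem.List.enumerate L k) := by
  induction L with
  | nil => intro k; simp [PySem.List.enumerate]
  | cons x xs ih =>
    intro k
    rw [pvEnumCons]
    refine List.pairwise_cons.mpr ⟨?_, ih (k + 1)⟩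
    intro p hp
    have := (pvEnumBound xs (k + 1) p hp).1
    omega

-- ===== VERDICT (by name: the statement is the Claim_ definition above) =====
theorem solution_spec : Claim_equal_solution := by
  intro myString pat _hdom _hpre
  unfold Spec_solution solution solution_alt
  simp only []
  set L := myString.toList
  set P := pat.toList
  congr 1
  congr 1
  rw [pvFoldA P L (PySem.List.enumerate L) 0 [] false,
      pvFoldB P L (solutionAltFind P L (PySem.List.enumerate L) (L.length : Int))
        (PySem.List.enumerate L) []]
  simp only [List.nil_append]
  exact pvGoA_false P L (PySem.List.enumerate L) (L.length : Int)
    (fun p hp => by have := (pvEnumBound L 0 p hp).2; omega)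
    (pvEnumSorted L 0)
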